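-- pv_equiv track=rewrite | github.com/AnnieTran2023/python-codes | matrix/sudoku_check_grid.py | column_ok
-- ===== SOURCE A (Python) =====
-- def column_ok(nestedList, column_index):
--
--     column = []
--
--     for list in nestedList:
--         column.append(list[column_index])
--     result = set()
--
--     for number in column:
--         if number != 0:
--             if number in result:
--                 return False
--             else:
--                 result.add(number)
--     return True
-- ===== SOURCE B (Python) =====
-- def column_ok(nestedList, column_index):
--     column = [row[column_index] for row in nestedList]
--     vals = sorted(v for v in column if v != 0)
--     return all(a < b for a, b in zip(vals, vals[1:]))
-- ===== Notes on version B (the rewrite author's own statement) =====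
-- stated objective: alternative
-- what changed: Duplicate detection by incremental hash-set membership is replaced by sorting the nonzero column values once and checking that consecutive sorted values are strictly increasing.
import Mathlib
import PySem

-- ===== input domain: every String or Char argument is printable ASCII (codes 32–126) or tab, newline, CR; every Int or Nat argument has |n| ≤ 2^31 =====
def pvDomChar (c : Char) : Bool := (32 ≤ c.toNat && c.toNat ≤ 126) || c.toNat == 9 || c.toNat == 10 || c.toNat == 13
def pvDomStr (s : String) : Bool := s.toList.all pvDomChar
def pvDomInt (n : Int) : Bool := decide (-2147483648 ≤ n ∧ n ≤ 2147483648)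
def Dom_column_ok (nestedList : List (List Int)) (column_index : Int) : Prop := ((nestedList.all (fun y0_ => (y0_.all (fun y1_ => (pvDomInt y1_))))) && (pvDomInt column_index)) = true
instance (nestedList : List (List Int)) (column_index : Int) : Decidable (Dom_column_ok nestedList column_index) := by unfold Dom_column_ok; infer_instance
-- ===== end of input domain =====

-- B replaces A's incremental hash-set duplicate check by sort-then-adjacent-compare (alternative
-- decomposition, same return value); equivalence is about the return value on valid column indices.

-- ===== PORT A =====
-- the second 'for number in column' loop, with its early 'return False'
def columnOkLoop : List Int → PySem.Set Int → Bool
  | [], _ => true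
  | number :: rest, result =>
    if number ≠ 0 then
      if PySem.Set.contains result number then false
      else columnOkLoop rest (PySem.Set.add result number)
    else columnOkLoop rest result

def column_ok (nestedList : List (List Int)) (column_index : Int) : Bool :=
  -- first loop: column.append(list[column_index]); row[column_index] may raise (none), excluded by Pre_
  match nestedList.mapM (fun row => PySem.List.pyGet? row column_index) with
  | none => false   -- unreachable under Pre_column_ok (IndexError in Python)
  | some column => columnOkLoop column PySem.Set.empty

-- ===== PORT B =====
def column_ok_alt (nestedList : List (List Int)) (column_index : Int) : Bool :=
  match nestedList.mapM (fun row => PySem.List.pyGet? row column_index) with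
  | none => false   -- unreachable under Pre_column_ok (IndexError in Python)
  | some column =>
    let vals := PySem.List.sorted (column.filter (fun v => v ≠ 0)) (fun x => x) false
    (vals.zip (vals.drop 1)).all (fun p => p.1 < p.2)

-- ===== PRECONDITION & SPEC =====
-- Pre_ excludes exactly the inputs where some row lacks the column index, on which A raises IndexError
def Pre_column_ok (nestedList : List (List Int)) (column_index : Int) : Prop :=
  ∀ row ∈ nestedList, PySem.Raise.InRange row.length column_index
instance (nestedList : List (List Int)) (column_index : Int) : Decidable (Pre_column_ok nestedList column_index) := by unfold Pre_column_ok; infer_instance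
def pvWitness_column_ok : List (List Int) × Int := ([[1, 0], [2, 0], [3, 2]], 0)

def Spec_column_ok (nestedList : List (List Int)) (column_index : Int) (out : Bool) : Prop := out = column_ok_alt nestedList column_index
instance (nestedList : List (List Int)) (column_index : Int) (out : Bool) : Decidable (Spec_column_ok nestedList column_index out) := by unfold Spec_column_ok; infer_instance

-- ===== CLAIM (what is proved, stated in full; the proofs are below) =====
def Claim_equal_column_ok : Prop := ∀ (nestedList : List (List Int)) (column_index : Int), Dom_column_ok nestedList column_index → Pre_column_ok nestedList column_index → Spec_column_ok nestedList column_index (column_ok nestedList column_index)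

-- ===== LEMMAS AND PROOFS =====

-- A's loop succeeds iff the nonzero values are pairwise distinct and disjoint from the seen set
theorem columnOkLoop_eq_true_iff (l : List Int) (s : PySem.Set Int) :
    columnOkLoop l s = true ↔
      (l.filter (fun v => v ≠ 0)).Nodup ∧ ∀ x ∈ l.filter (fun v => v ≠ 0), x ∉ s := by
  induction l generalizing s with
  | nil => simp [columnOkLoop]
  | cons n rest ih =>
    by_cases hn : n = 0
    · subst hn
      simp [columnOkLoop, ih]
    · rw [columnOkLoop]
      simp only [if_pos hn, List.filter_cons, if_pos (by simpa using hn : decide (n ≠ 0) = true)]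
      by_cases hc : PySem.Set.contains s n
      · rw [if_pos hc]
        have hmem : n ∈ s := by simpa using hc
        constructor
        · intro h; exact absurd h (by simp)
        · rintro ⟨-, hdisj⟩
          exact absurd hmem (hdisj n (by simp))
      · rw [if_neg hc]
        have hnot : n ∉ s := by simpa using hc
        rw [ih, List.nodup_cons]
        constructor
        · rintro ⟨hnd, hdisj⟩
          have hnn : n ∉ rest.filter (fun v => v ≠ 0) := fun h => by
            have := hdisj n h
            rw [PySem.Set.mem_add] at this
            exact this (Or.inr rfl)
          refine ⟨⟨hnn, hnd⟩, ?_⟩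
          intro x hx
          rcases List.mem_cons.mp hx with rfl | hx'
          · exact hnot
          · intro hxs
            have := hdisj x hx'
            exact this ((PySem.Set.mem_add s n x).mpr (Or.inl hxs))
        · rintro ⟨⟨hnn, hnd⟩, hdisj⟩
          refine ⟨hnd, ?_⟩
          intro x hx hxadd
          rcases (PySem.Set.mem_add s n x).mp hxadd with hxs | rfl
          · exact hdisj x (List.mem_cons_of_mem _ hx) hxs
          · exact hnn hx

-- adjacent all-< on a list is IsChain (<)
theorem zip_drop_all_lt (l : List Int) :
    ((l.zip (l.drop 1)).all (fun p => p.1 < p.2)) = true ↔ l.IsChain (· < ·) := by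
  induction l with
  | nil => simp
  | cons a t ih =>
    cases t with
    | nil => simp
    | cons b t' =>
      simp only [List.drop_one, List.tail_cons, List.zip_cons_cons, List.all_cons,
        Bool.and_eq_true, decide_eq_true_eq, List.isChain_cons_cons]
      rw [← ih]
      simp

-- B's test on the sorted nonzero values holds iff they are pairwise distinct
theorem alt_test_iff_nodup (xs : List Int) :
    ((PySem.List.sorted xs (fun x => x) false).zip
        ((PySem.List.sorted xs (fun x => x) false).drop 1)).all (fun p => p.1 < p.2) = true ↔
      xs.Nodup := by
  set vals := PySem.List.sorted xs (fun x => x) false with hv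
  have hperm : vals.Perm xs := PySem.List.sorted_perm xs (fun x => x) false
  have hle : vals.Pairwise (· ≤ ·) := PySem.List.sorted_pairwise xs (fun x => x)
  rw [zip_drop_all_lt]
  constructor
  · intro hch
    exact hperm.nodup_iff.mp (hch.pairwise.imp ne_of_lt)
  · intro hnd
    have hnd' : vals.Nodup := hperm.nodup_iff.mpr hnd
    exact ((hle.and hnd').imp (fun h => lt_of_le_of_ne h.1 h.2)).isChain

-- under Pre_ every row access succeeds, so the column extraction returns some
theorem mapM_pyGet_isSome (nestedList : List (List Int)) (column_index : Int)
    (hpre : ∀ row ∈ nestedList, PySem.Raise.InRange row.length column_index) :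
    (nestedList.mapM (fun row => PySem.List.pyGet? row column_index)).isSome := by
  induction nestedList with
  | nil => simp
  | cons r t ih =>
    have hr : (PySem.List.pyGet? r column_index).isSome := by
      rw [Option.isSome_iff_ne_none]
      intro hnone
      exact (PySem.List.pyGet?_eq_none_iff r column_index).mp hnone (hpre r (by simp))
    rcases Option.isSome_iff_exists.mp hr with ⟨v, hv⟩
    rcases Option.isSome_iff_exists.mp (ih (fun row h => hpre row (by simp [h]))) with ⟨vs, hvs⟩
    simp [List.mapM_cons, hv, hvs]

-- ===== VERDICT (by name: the statement is the Claim_ definition above) =====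
theorem column_ok_spec : Claim_equal_column_ok := by
  intro nestedList column_index _hdom hpre
  unfold Spec_column_ok column_ok column_ok_alt
  cases h : nestedList.mapM (fun row => PySem.List.pyGet? row column_index) with
  | none => exact absurd (h ▸ mapM_pyGet_isSome nestedList column_index hpre) (by simp)
  | some column =>
    simp only
    rw [Bool.eq_iff_iff, columnOkLoop_eq_true_iff, alt_test_iff_nodup]
    simp [PySem.Set.empty]
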